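-- pv_equiv track=rewrite | github.com/sarasabu/Python-programming | pgm26.py | longestWordLength
-- ===== SOURCE A (Python) =====
-- def longestWordLength(string):
--     length=0
--     w=''
--     for word in string.split():
--         if(len(word)>length):
--             length=len(word)
--             w=word
--     return(length,w)
-- ===== SOURCE B (Python) =====
-- def longestWordLength(string):
--     words = string.split()
--     if not words:
--         return (0, '')
--     w = sorted(words, key=len, reverse=True)[0]
--     return (len(w), w)
-- ===== Notes on version B (the rewrite author's own statement) =====
-- stated objective: alternative
-- what changed: Replaces A's running-maximum accumulator loop with split-then-stable-sort by length descending and taking the first element (stability reproduces A's first-longest tie-break).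
import Mathlib
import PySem

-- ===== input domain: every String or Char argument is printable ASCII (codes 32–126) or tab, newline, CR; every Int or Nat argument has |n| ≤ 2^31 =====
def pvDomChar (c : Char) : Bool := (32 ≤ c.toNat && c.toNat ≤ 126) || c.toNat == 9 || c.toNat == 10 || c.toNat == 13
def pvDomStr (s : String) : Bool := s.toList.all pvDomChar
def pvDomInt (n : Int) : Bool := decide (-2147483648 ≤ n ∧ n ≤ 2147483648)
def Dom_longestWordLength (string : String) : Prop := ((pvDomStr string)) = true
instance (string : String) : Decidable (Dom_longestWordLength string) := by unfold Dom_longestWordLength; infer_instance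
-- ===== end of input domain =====

-- B replaces A's running-maximum loop with a stable sort by length (descending) and takes the
-- first element; same result, different decomposition ("alternative", no speed claim).

-- ===== PORT A =====
def longestWordLength (string : String) : Int × String :=
  (PySem.Str.split₀ string).foldl
    (fun st word => if PySem.Str.len word > st.1 then (PySem.Str.len word, word) else st)
    (0, "")

-- ===== PORT B =====
def longestWordLength_alt (string : String) : Int × String :=
  let words := PySem.Str.split₀ string
  if words.isEmpty then (0, "")
  else
    -- sorted(words, key=len, reverse=True)[0]; indexing is total here since words ≠ []
    let w := (PySem.List.sorted words (fun v => PySem.Str.len v) true).headD ""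
    (PySem.Str.len w, w)

-- ===== PRECONDITION & SPEC =====
def Spec_longestWordLength (string : String) (out : Int × String) : Prop := out = longestWordLength_alt string
instance (string : String) (out : Int × String) : Decidable (Spec_longestWordLength string out) := by unfold Spec_longestWordLength; infer_instance

-- ===== CLAIM (what is proved, stated in full; the proofs are below) =====
def Claim_equal_longestWordLength : Prop := ∀ (string : String), Dom_longestWordLength string → Spec_longestWordLength string (longestWordLength string)

-- ===== LEMMAS AND PROOFS =====

-- every word produced by Chars.split₀.go is nonempty (given the accumulator's words are)
theorem pv_go_ne_nil (cs : List Char) : ∀ (cur : List Char) (acc : List (List Char)),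
    (∀ v ∈ acc, v ≠ []) → ∀ v ∈ PySem.Chars.split₀.go cs cur acc, v ≠ [] := by
  induction cs with
  | nil =>
    intro cur acc hacc v hv
    unfold PySem.Chars.split₀.go at hv
    by_cases h : cur.isEmpty
    · simp [h] at hv; exact hacc v (by simpa using hv)
    · simp [h] at hv
      rcases hv with hv | hv
      · exact hacc v hv
      · subst hv; simpa [List.isEmpty_iff] using h
  | cons c rest ih =>
    intro cur acc hacc v hv
    unfold PySem.Chars.split₀.go at hv
    by_cases hs : PySem.Chars.isspace c
    · by_cases h : cur.isEmpty
      · simp [hs, h] at hv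
        exact ih [] acc hacc v hv
      · simp [hs, h] at hv
        refine ih [] (cur.reverse :: acc) ?_ v hv
        intro u hu
        rcases List.mem_cons.mp hu with rfl | hu2
        · simpa [List.isEmpty_iff] using h
        · exact hacc u hu2
    · simp [hs] at hv
      exact ih (c :: cur) acc hacc v hv

theorem pv_split_word_ne (s : String) : ∀ w ∈ PySem.Str.split₀ s, w ≠ "" := by
  intro w hw hcontra
  have hmem : w.toList ∈ PySem.Chars.split₀ s.toList := by
    rw [← PySem.Str.split₀_map_toList]
    exact List.mem_map_of_mem hw
  have := pv_go_ne_nil s.toList [] [] (by simp) w.toList (by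
    simpa [PySem.Chars.split₀] using hmem)
  subst hcontra
  simp at this

-- the relation between A's accumulator state and B's insertion-sorted list
def pvRel (st : Int × String) (acc : List String) : Prop :=
  (acc = [] ∧ st = (0, "")) ∨
  (∃ t, acc = st.2 :: t ∧ st.1 = PySem.Str.len st.2 ∧ 0 < st.1)

theorem pv_step (st : Int × String) (acc : List String) (w : String)
    (hw : w ≠ "") (hrel : pvRel st acc) :
    pvRel (if PySem.Str.len w > st.1 then (PySem.Str.len w, w) else st)
      (PySem.List.insertBy (fun a b => decide (PySem.Str.len b < PySem.Str.len a)) w acc) := by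
  have hwne : w.toList ≠ [] := by
    intro h
    apply hw
    have h2 := congrArg String.ofList h
    simpa using h2
  have hwpos : 0 < PySem.Str.len w := by
    rw [PySem.Str.len_eq]
    exact_mod_cast List.length_pos_iff.mpr hwne
  rcases hrel with ⟨rfl, rfl⟩ | ⟨t, hacc, hlen, hpos⟩
  · have hins : PySem.List.insertBy (fun a b => decide (PySem.Str.len b < PySem.Str.len a)) w [] = [w] := by
      simp [PySem.List.insertBy]
    rw [hins, if_pos (show PySem.Str.len w > (0, "").1 from hwpos)]
    exact Or.inr ⟨[], rfl, rfl, hwpos⟩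
  · subst hacc
    by_cases hcmp : PySem.Str.len st.2 < PySem.Str.len w
    · have hc' : st.2.length < w.length := by
        simpa [PySem.Str.len] using hcmp
      have hins : PySem.List.insertBy (fun a b => decide (PySem.Str.len b < PySem.Str.len a)) w (st.2 :: t)
          = w :: st.2 :: t := by
        simp [PySem.List.insertBy, hc']
      rw [hins, if_pos (show PySem.Str.len w > st.1 by rw [hlen]; exact hcmp)]
      exact Or.inr ⟨st.2 :: t, rfl, rfl, hwpos⟩
    · have hc' : ¬ st.2.length < w.length := by
        simpa [PySem.Str.len] using hcmp
      have hins : PySem.List.insertBy (fun a b => decide (PySem.Str.len b < PySem.Str.len a)) w (st.2 :: t)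
          = st.2 :: PySem.List.insertBy (fun a b => decide (PySem.Str.len b < PySem.Str.len a)) w t := by
        simp [PySem.List.insertBy, hc']
      rw [hins, if_neg (show ¬ PySem.Str.len w > st.1 by rw [hlen]; exact hcmp)]
      exact Or.inr ⟨_, rfl, hlen, hpos⟩

theorem pv_fold (ws : List String) : ∀ (st : Int × String) (acc : List String),
    (∀ w ∈ ws, w ≠ "") → pvRel st acc →
    pvRel
      (ws.foldl (fun st word => if PySem.Str.len word > st.1 then (PySem.Str.len word, word) else st) st)
      (ws.foldl (fun acc x => PySem.List.insertBy (fun a b => decide (PySem.Str.len b < PySem.Str.len a)) x acc) acc) := by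
  induction ws with
  | nil => intro st acc _ h; exact h
  | cons w ws ih =>
    intro st acc hne hrel
    exact ih _ _ (fun v hv => hne v (List.mem_cons_of_mem _ hv))
      (pv_step st acc w (hne w (List.mem_cons_self)) hrel)

-- ===== VERDICT (by name: the statement is the Claim_ definition above) =====
theorem longestWordLength_spec : Claim_equal_longestWordLength := by
  intro s _
  unfold Spec_longestWordLength longestWordLength longestWordLength_alt
  have hrel := pv_fold (PySem.Str.split₀ s) (0, "") [] (pv_split_word_ne s) (Or.inl ⟨rfl, rfl⟩)
  rw [← PySem.List.sorted_rev_eq_foldl_insertBy (PySem.Str.split₀ s) (fun v => PySem.Str.len v)] at hrel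
  by_cases hnil : PySem.Str.split₀ s = []
  · simp [hnil]
  · rcases hrel with ⟨hacc, _⟩ | ⟨t, hacc, hlen, _⟩
    · exact absurd ((PySem.List.sorted_eq_nil_iff _ _ _).mp hacc) hnil
    · rw [if_neg (by simp [List.isEmpty_iff, hnil]), hacc]
      simp only [List.headD_cons]
      exact Prod.ext hlen rfl
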